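-- pv_equiv track=rewrite | github.com/ChristianHallerX/Python_Coding | Mishra2018_Heard_In_Data_Science_Interviews/Q1.7.py | decodableletters
-- ===== SOURCE A (Python) =====
-- def decodableletters(integers):
--
--     # convert to string, since this offers options to iterate
--     string = str(integers)
--
--     # the length of the string as if all letters were single digits (edge case)
--     allsingles = len(string)
--
--     # record of detected letters
--     counter = 0
--
--     # the single letter counter is used to avoid counting single digits twice (pairwise singles vs allsingles)
--     singlecounter = 0
--
--
--     # sliding window through string in pairs, zipped means the numbers are still separated
--     for pair in zip(string[::2], string[1::2]):
--
--         # join the two numbers of a pair into string and convert to integer (easier for math)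
--         number = int("".join(pair))
--
--         # if the number is larger than 26, then it can't be a one letter anymore, but must be two single letters
--         if number > 26:
--             counter += 2
--             singlecounter += 2
--         # if the pair number is smaller than 10, then the first digit must be 0 and the second one is a letter
--         elif number < 10:
--             counter += 1
--         # if the number is zero, then it is not a letter
--         elif number == 00:
--             counter += 0
--         # remaining is smaller than 26 and larger 10, then it's one letter
--         else:
--             counter += 1
--
--     # sliding window pairs one digit offset
--     for pair in zip(string[1::2], string[2::2]):
--         number = int("".join(pair))
--         if number > 26:
--             counter += 2
--             singlecounter += 2
--         elif number < 10:
--             counter += 1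
--         elif number == 00:
--             counter += 0
--         else:
--             counter += 1
--
--     # subtract the singlecounter from allsingles, otherwise we would count that twice
--     result = allsingles - singlecounter + counter
--
--     return result
-- ===== SOURCE B (Python) =====
-- def decodableletters(integers):
--     # One pass over adjacent character pairs: the two strided zip-loops of the
--     # original together visit exactly every adjacent pair, and each pair's net
--     # effect on the result is 0 when its two-char int exceeds 26, else +1.
--     s = str(integers)
--     return len(s) + sum(1 for a, b in zip(s, s[1:]) if int(a + b) <= 26)
-- ===== Notes on version B (the rewrite author's own statement) =====
-- stated objective: simpler
-- what changed: Replaces the two interleaved strided passes (zip(s[::2],s[1::2]) and zip(s[1::2],s[2::2])) and the pair of accumulators with a single traversal of all adjacent character pairs, counting pairs whose two-char int is <= 26 and adding len(s), since each >26 pair's +2/+2 cancels in allsingles - singlecounter + counter.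
import Mathlib
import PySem

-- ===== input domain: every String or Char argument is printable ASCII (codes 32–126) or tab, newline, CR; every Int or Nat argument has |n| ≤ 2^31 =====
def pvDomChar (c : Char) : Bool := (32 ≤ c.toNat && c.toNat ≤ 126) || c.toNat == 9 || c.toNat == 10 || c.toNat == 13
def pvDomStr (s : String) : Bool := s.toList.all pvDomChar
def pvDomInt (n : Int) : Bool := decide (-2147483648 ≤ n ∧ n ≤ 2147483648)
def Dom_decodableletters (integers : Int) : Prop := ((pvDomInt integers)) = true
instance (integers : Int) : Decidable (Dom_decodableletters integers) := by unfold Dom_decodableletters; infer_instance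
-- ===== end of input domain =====

-- B replaces A's two interleaved strided zip passes and pair of accumulators by a
-- single loop over all adjacent character pairs (objective: simpler; same O(n) cost).

-- ===== PORT A =====
-- number = int("".join(pair)): "".join builds the 2-char string of the pair (exact);
-- every such string from str(n) parses ("-d" or "dd"), so ofStr? is some and getD 0 is never used.
def pvNumA (p : Char × Char) : Int := (PySem.Int.ofStr? (String.ofList [p.1, p.2])).getD 0

-- one loop body of A: state (counter, singlecounter), branches in source order
def pvStepA (st : Int × Int) (p : Char × Char) : Int × Int :=
  if pvNumA p > 26 then (st.1 + 2, st.2 + 2)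
  else if pvNumA p < 10 then (st.1 + 1, st.2)
  else if pvNumA p = 0 then (st.1 + 0, st.2)
  else (st.1 + 1, st.2)

def decodableletters (integers : Int) : Int :=
  let string := (PySem.Int.toStr integers).toList
  let allsingles : Int := string.length
  -- s[::2], s[1::2], s[2::2]: slice? with step 2 is never none (step ≠ 0)
  let ev0 := (PySem.List.slice? string none none 2).getD []
  let ev1 := (PySem.List.slice? string (some 1) none 2).getD []
  let ev2 := (PySem.List.slice? string (some 2) none 2).getD []
  let st1 := (ev0.zip ev1).foldl pvStepA (0, 0)
  let st2 := (ev1.zip ev2).foldl pvStepA st1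
  allsingles - st2.2 + st2.1

-- ===== PORT B =====
-- int(a + b) for two adjacent characters
def pvNumB (a b : Char) : Int := (PySem.Int.ofStr? (String.ofList [a, b])).getD 0

def decodableletters_alt (integers : Int) : Int :=
  let s := (PySem.Int.toStr integers).toList
  (s.length : Int) +
    (s.zip (PySem.List.slice s (some 1) none)).foldl
      (fun acc p => if pvNumB p.1 p.2 ≤ 26 then acc + 1 else acc) 0

-- ===== PRECONDITION & SPEC =====
def Spec_decodableletters (integers : Int) (out : Int) : Prop := out = decodableletters_alt integers
instance (integers : Int) (out : Int) : Decidable (Spec_decodableletters integers out) := by unfold Spec_decodableletters; infer_instance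

-- ===== CLAIM (what is proved, stated in full; the proofs are below) =====
def Claim_equal_decodableletters : Prop := ∀ (integers : Int), Dom_decodableletters integers → Spec_decodableletters integers (decodableletters integers)

-- ===== LEMMAS AND PROOFS =====

-- the elements of l at even indices
def pvEvens {α : Type} : List α → List α
  | [] => []
  | [a] => [a]
  | a :: _ :: t => a :: pvEvens t

theorem pvEvens_cons {α : Type} (a : α) (t : List α) :
    pvEvens (a :: t) = a :: pvEvens t.tail := by
  cases t <;> simp [pvEvens]

theorem pvFilterMap_evens {α : Type} (l : List α) :
    (List.range ((l.length + 1) / 2)).filterMap (fun k => l[2 * k]?) = pvEvens l := by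
  induction l using pvEvens.induct with
  | case1 => simp [pvEvens]
  | case2 a => simp [pvEvens, List.range_succ]
  | case3 a b t ih =>
    have hc : ((a :: b :: t).length + 1) / 2 = (t.length + 1) / 2 + 1 := by
      simp; omega
    rw [hc, List.range_succ_eq_map]
    simp only [List.filterMap_cons, List.filterMap_map]
    have h0 : (a :: b :: t)[2 * 0]? = some a := by simp
    rw [h0]
    have hstep : ∀ k : Nat, (a :: b :: t)[2 * (k + 1)]? = t[2 * k]? := by
      intro k
      have h2 : 2 * (k + 1) = (2 * k + 1) + 1 := by omega
      simp [h2]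
    simp only [Function.comp_def, Nat.succ_eq_add_one, hstep, ih, pvEvens]

-- s[::2], s[1::2], s[2::2] are the even-index elements of l, l.tail, l.tail.tail
theorem pvSlice2_zero {α : Type} (l : List α) :
    PySem.List.slice? l none none 2 = some (pvEvens l) := by
  rw [← pvFilterMap_evens]
  simp only [PySem.List.slice?, PySem.List.sliceIndices]
  norm_num
  have hc : (if 0 < l.length then (((l.length : Int) + 2 - 1) / 2).toNat else 0)
      = (l.length + 1) / 2 := by split <;> omega
  have hi : ∀ k : Nat, (2 * (k : Int)).toNat = 2 * k := by intro k; omega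
  simp [hc, hi]

theorem pvSlice2_one {α : Type} (l : List α) :
    PySem.List.slice? l (some 1) none 2 = some (pvEvens l.tail) := by
  rw [← pvFilterMap_evens]
  simp only [PySem.List.slice?, PySem.List.sliceIndices]
  norm_num
  rcases Nat.eq_zero_or_pos l.length with h0 | h0
  · have : l = [] := List.length_eq_zero_iff.mp h0
    subst this; simp
  · have hmin : min 1 (l.length : Int) = 1 := by omega
    rw [hmin]
    have hi : ∀ x : Nat, ((1 : Int) + 2 * (x : Int)).toNat = 2 * x + 1 := by intro x; omega
    have hc : (if 1 < l.length then (((l.length : Int) - 1 + 2 - 1) / 2).toNat else 0)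
        = (l.tail.length + 1) / 2 := by
      simp only [List.length_tail]; split <;> omega
    have hg : ∀ x : Nat, l[2 * x + 1]? = l.tail[2 * x]? := by
      intro x; simp
    simp only [hi, hc, hg]
    simp [List.length_tail]

theorem pvSlice2_two {α : Type} (l : List α) :
    PySem.List.slice? l (some 2) none 2 = some (pvEvens l.tail.tail) := by
  rw [← pvFilterMap_evens]
  simp only [PySem.List.slice?, PySem.List.sliceIndices]
  norm_num
  match l with
  | [] => simp
  | [a] => simp
  | a :: b :: t =>
    have hmin : min 2 ((a :: b :: t).length : Int) = 2 := by simp; omega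
    rw [hmin]
    have hi : ∀ x : Nat, ((2 : Int) + 2 * (x : Int)).toNat = 2 * x + 2 := by intro x; omega
    have hc : (if 2 < (a :: b :: t).length then ((((a :: b :: t).length : Int) - 2 + 2 - 1) / 2).toNat else 0)
        = ((a :: b :: t).tail.tail.length + 1) / 2 := by
      simp only [List.length_tail, List.length_cons]; split <;> simp_all; omega
    have hg : ∀ x : Nat, (a :: b :: t)[2 * x + 2]? = t[2 * x]? := by
      intro x
      have h2 : 2 * x + 2 = (2 * x + 1) + 1 := by omega
      simp [h2]
    simp only [hi, hc, hg, List.tail_cons]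
    have hl : (a :: b :: t).length - 1 - 1 = t.length := by simp
    rw [hl]

-- per-pair weight: net contribution of a pair to A's result (and B's count)
def pvW (p : Char × Char) : Int := if pvNumA p > 26 then 0 else 1

def pvSum (l : List (Char × Char)) : Int := (l.map pvW).sum

-- A's fold tracked against pvSum: counter - singlecounter grows by pvW per pair
theorem pvFoldA_spec (l : List (Char × Char)) (c s : Int) :
    ((l.foldl pvStepA (c, s)).1 - (l.foldl pvStepA (c, s)).2)
      = (c - s) + pvSum l := by
  induction l generalizing c s with
  | nil => simp [pvSum]
  | cons p t ih =>
    simp only [List.foldl_cons]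
    rcases hst : pvStepA (c, s) p with ⟨c', s'⟩
    have hd : c' - s' = (c - s) + pvW p := by
      simp only [pvStepA] at hst
      split_ifs at hst with h1 h2 h3 <;> injection hst with hc hs <;>
        simp [pvW, h1] <;> omega
    have hps : pvSum (p :: t) = pvW p + pvSum t := by simp [pvSum]
    rw [ih, hps]
    omega

-- B's fold is pvSum over its pair list
theorem pvFoldB_spec (l : List (Char × Char)) (acc : Int) :
    l.foldl (fun acc p => if pvNumB p.1 p.2 ≤ 26 then acc + 1 else acc) acc
      = acc + pvSum l := by
  induction l generalizing acc with
  | nil => simp [pvSum]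
  | cons p t ih =>
    simp only [List.foldl_cons, ih]
    have hps : pvSum (p :: t) = pvW p + pvSum t := by simp [pvSum]
    have hn : pvNumB p.1 p.2 = pvNumA p := rfl
    rw [hps, hn]
    unfold pvW
    split_ifs <;> omega

-- key decomposition: A's two strided pair lists together weigh as much as
-- B's single adjacent-pair list
theorem pvSplit (l : List Char) :
    pvSum (l.zip l.tail)
      = pvSum ((pvEvens l).zip (pvEvens l.tail))
        + pvSum ((pvEvens l.tail).zip (pvEvens l.tail.tail)) := by
  induction l with
  | nil => simp [pvEvens, pvSum]
  | cons a t ih =>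
    cases t with
    | nil => simp [pvEvens, pvSum]
    | cons b t' =>
      have he : pvEvens (a :: b :: t') = a :: pvEvens t' := by simp [pvEvens]
      have he' : pvEvens (b :: t') = b :: pvEvens t'.tail := pvEvens_cons b t'
      simp only [List.tail_cons, he, he', List.zip_cons_cons, pvSum, List.map_cons,
        List.sum_cons] at *
      omega

-- ===== VERDICT (by name: the statement is the Claim_ definition above) =====
theorem decodableletters_spec : Claim_equal_decodableletters := by
  intro integers _
  unfold Spec_decodableletters decodableletters decodableletters_alt
  simp only [pvSlice2_zero, pvSlice2_one, pvSlice2_two, Option.getD_some,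
    PySem.List.slice_from_one]
  rw [pvFoldB_spec]
  set l := (PySem.Int.toStr integers).toList with hl
  have h1 := pvFoldA_spec ((pvEvens l).zip (pvEvens l.tail)) 0 0
  set st1 := ((pvEvens l).zip (pvEvens l.tail)).foldl pvStepA (0, 0) with hst1
  have h2 := pvFoldA_spec ((pvEvens l.tail).zip (pvEvens l.tail.tail)) st1.1 st1.2
  have h2' : ((pvEvens l.tail).zip (pvEvens l.tail.tail)).foldl pvStepA st1 =
      ((pvEvens l.tail).zip (pvEvens l.tail.tail)).foldl pvStepA (st1.1, st1.2) := by
    rw [← Prod.mk.eta (p := st1)]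
  rw [h2']
  have h3 := pvSplit l
  omega
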